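-- pv_equiv track=rewrite | github.com/mavdian14/Portfolio | Problem Solving/Bit Manipulation/Winning Lottery Ticket.py | winningLotteryTicket
-- ===== SOURCE A (Python) =====
-- def winningLotteryTicket(tickets):
--     a='0123456789'
--     t_count=[0]*1024
--     for t in tickets:
--         b=''
--         for num in a:
--             if num in t:
--                 b+='1'
--             else:
--                 b+='0'
--         b=int(b,2)
--         t_count[b] +=1
--     r=0
--     for i1,t1 in enumerate(t_count[:1023]):
--         if t1:
--             for i2 in range(i1+1,1024):
--                 if (i1 | i2) == 1023:
--                     r+=t1*t_count[i2]
--     r+= (t_count[-1]*(t_count[-1]-1))//2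
--     return(r)
-- ===== SOURCE B (Python) =====
-- def _mask(t):
--     m = 0
--     for i, d in enumerate('0123456789'):
--         if d in t:
--             m += 1 << (9 - i)
--     return m
--
-- def winningLotteryTicket(tickets):
--     masks = [_mask(t) for t in tickets]
--     r = 0
--     while masks:
--         m = masks.pop(0)
--         for m2 in masks:
--             if m | m2 == 1023:
--                 r += 1
--     return r
-- ===== Notes on version B (the rewrite author's own statement) =====
-- stated objective: simpler
-- what changed: B replaces A's 1024-slot mask bucketing with its 1023x1024 index-pair scan and separate same-bucket binomial term by a direct pairwise scan over the tickets' digit masks, counting pairs whose OR covers all ten digits.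
import Mathlib
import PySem

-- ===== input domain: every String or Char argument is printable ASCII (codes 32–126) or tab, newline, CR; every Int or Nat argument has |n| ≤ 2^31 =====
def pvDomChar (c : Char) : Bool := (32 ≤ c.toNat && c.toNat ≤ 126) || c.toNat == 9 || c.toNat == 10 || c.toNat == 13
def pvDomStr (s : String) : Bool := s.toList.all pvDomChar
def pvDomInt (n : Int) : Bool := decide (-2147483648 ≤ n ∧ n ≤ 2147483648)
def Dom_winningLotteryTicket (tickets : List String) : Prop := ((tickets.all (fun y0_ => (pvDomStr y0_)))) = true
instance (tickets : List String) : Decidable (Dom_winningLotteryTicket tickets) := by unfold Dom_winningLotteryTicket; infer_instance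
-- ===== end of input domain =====

set_option maxRecDepth 16384
set_option maxHeartbeats 1000000


-- B replaces A's 1024-slot mask bucketing + fixed 1023×1024 index-pair scan (plus a separate
-- same-bucket binomial term) by a direct pairwise scan over the tickets' digit masks; objective:
-- simpler (no speed claim).

-- ===== PORT A =====
-- int(b, 2): b is built from chars '0'/'1' only, on which this loop is exact
def pvParseBin (b : List Char) : Int :=
  b.foldl (fun acc c => 2 * acc + (if c = '1' then 1 else 0)) 0

def winningLotteryTicket (tickets : List String) : Int :=
  let a : String := "0123456789"
  let t_count : List Int := List.replicate 1024 0
  let t_count := tickets.foldl (fun t_count t =>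
    -- b is built by string concatenation; Python str modelled as List Char ('num in t' is
    -- single-character substring membership, exact via PySem.Chars.isIn)
    let b : List Char := a.toList.foldl (fun b num =>
      if PySem.Chars.isIn [num] t.toList then b ++ ['1'] else b ++ ['0']) []
    let b : Int := pvParseBin b
    PySem.List.pySetD t_count b (PySem.List.pyGetD t_count b 0 + 1)) t_count
  let r : Int := (PySem.List.enumerate (PySem.List.slice t_count none (some 1023)) 0).foldl
    (fun r p =>
      if p.2 ≠ 0 then
        (PySem.List.pyRange (p.1 + 1) 1024 1).foldl
          (fun r i2 => if PySem.Int.bor p.1 i2 = 1023 then r + p.2 * PySem.List.pyGetD t_count i2 0 else r) r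
      else r) 0
  r + PySem.Int.floordiv (PySem.List.pyGetD t_count (-1) 0 * (PySem.List.pyGetD t_count (-1) 0 - 1)) 2

-- ===== PORT B =====
-- 1 << (9 - i): i ∈ 0..9, so the shift amount is a nonnegative int and .toNat is exact
def pvMask (t : String) : Int :=
  (PySem.List.enumerate "0123456789".toList 0).foldl
    (fun m p => if PySem.Chars.isIn [p.2] t.toList then m + ((1:Int) <<< (9 - p.1).toNat) else m) 0

def pvPairLoop : List Int → Int → Int
  | [], r => r
  | m :: masks, r =>
      pvPairLoop masks (masks.foldl (fun r m2 => if PySem.Int.bor m m2 = 1023 then r + 1 else r) r)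

def winningLotteryTicket_alt (tickets : List String) : Int :=
  pvPairLoop (tickets.map pvMask) 0

-- ===== PRECONDITION & SPEC =====
def Spec_winningLotteryTicket (tickets : List String) (out : Int) : Prop := out = winningLotteryTicket_alt tickets
instance (tickets : List String) (out : Int) : Decidable (Spec_winningLotteryTicket tickets out) := by unfold Spec_winningLotteryTicket; infer_instance

-- ===== CLAIM (what is proved, stated in full; the proofs are below) =====
def Claim_equal_winningLotteryTicket : Prop := ∀ (tickets : List String), Dom_winningLotteryTicket tickets → Spec_winningLotteryTicket tickets (winningLotteryTicket tickets)

-- ===== LEMMAS AND PROOFS =====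

-- ---- the per-ticket digit mask: A's string-build + int(_,2) equals B's sum of bits ----

lemma ite_add_right (c : Prop) [Decidable c] (m x : Int) :
    (if c then m + x else m) = m + (if c then x else 0) := by split <;> simp

def pvBit (t : String) (d : Char) : Int := if PySem.Chars.isIn [d] t.toList then 1 else 0

lemma pvBit_bounds (t : String) (d : Char) : 0 ≤ pvBit t d ∧ pvBit t d ≤ 1 := by
  unfold pvBit; split <;> norm_num

lemma mask_expand (t : String) :
    pvMask t = pvBit t '0' * 512 + pvBit t '1' * 256 + pvBit t '2' * 128 + pvBit t '3' * 64
      + pvBit t '4' * 32 + pvBit t '5' * 16 + pvBit t '6' * 8 + pvBit t '7' * 4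
      + pvBit t '8' * 2 + pvBit t '9' * 1 := by
  have h10 : "0123456789".toList = ['0','1','2','3','4','5','6','7','8','9'] := rfl
  simp only [pvMask, h10, PySem.List.enumerate, List.foldl_cons, List.foldl_nil, ite_add_right]
  have e9 : (1:Int) <<< 9 = 512 := by decide
  have e8 : (1:Int) <<< 8 = 256 := by decide
  have e7 : (1:Int) <<< 7 = 128 := by decide
  have e6 : (1:Int) <<< 6 = 64 := by decide
  have e5 : (1:Int) <<< 5 = 32 := by decide
  have e4 : (1:Int) <<< 4 = 16 := by decide
  have e3 : (1:Int) <<< 3 = 8 := by decide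
  have e2 : (1:Int) <<< 2 = 4 := by decide
  have e1 : (1:Int) <<< 1 = 2 := by decide
  have e0 : (1:Int) <<< 0 = 1 := by decide
  simp only [pvBit, ite_mul, zero_mul, one_mul]
  norm_num [e9, e8, e7, e6, e5, e4, e3, e2, e1, e0]

lemma parse_build (q : Char → Bool) : ∀ (ds : List Char) (acc : List Char),
    pvParseBin (ds.foldl (fun b num => if q num then b ++ ['1'] else b ++ ['0']) acc)
      = ds.foldl (fun a num => 2 * a + (if q num then 1 else 0)) (pvParseBin acc) := by
  intro ds
  induction ds with
  | nil => intro acc; rfl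
  | cons c ds ih =>
    intro acc
    simp only [List.foldl_cons]
    rw [ih]
    congr 1
    cases hq : q c <;> simp [pvParseBin, List.foldl_append]

lemma maskA_eq (t : String) :
    pvParseBin ("0123456789".toList.foldl
        (fun b num => if PySem.Chars.isIn [num] t.toList then b ++ ['1'] else b ++ ['0']) [])
      = pvMask t := by
  rw [parse_build]
  have h10 : "0123456789".toList = ['0','1','2','3','4','5','6','7','8','9'] := rfl
  rw [h10, mask_expand]
  simp only [List.foldl_cons, List.foldl_nil, pvParseBin]
  show 2*(2*(2*(2*(2*(2*(2*(2*(2*(2*0 + pvBit t '0') + pvBit t '1') + pvBit t '2') + pvBit t '3')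
    + pvBit t '4') + pvBit t '5') + pvBit t '6') + pvBit t '7') + pvBit t '8') + pvBit t '9' = _
  ring

lemma mask_bounds (t : String) : 0 ≤ pvMask t ∧ pvMask t ≤ 1023 := by
  rw [mask_expand]
  obtain ⟨a0, b0⟩ := pvBit_bounds t '0'
  obtain ⟨a1, b1⟩ := pvBit_bounds t '1'
  obtain ⟨a2, b2⟩ := pvBit_bounds t '2'
  obtain ⟨a3, b3⟩ := pvBit_bounds t '3'
  obtain ⟨a4, b4⟩ := pvBit_bounds t '4'
  obtain ⟨a5, b5⟩ := pvBit_bounds t '5'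
  obtain ⟨a6, b6⟩ := pvBit_bounds t '6'
  obtain ⟨a7, b7⟩ := pvBit_bounds t '7'
  obtain ⟨a8, b8⟩ := pvBit_bounds t '8'
  obtain ⟨a9, b9⟩ := pvBit_bounds t '9'
  constructor <;> omega

-- ---- shared loop-shape infrastructure ----

lemma foldl_if_add {α : Type} (l : List α) (P : α → Prop) [DecidablePred P] (f : α → Int) (r : Int) :
    l.foldl (fun r x => if P x then r + f x else r) r
      = r + (l.map (fun x => if P x then f x else 0)).sum := by
  have h : (fun (r : Int) x => if P x then r + f x else r)
      = fun (r : Int) x => r + (if P x then f x else 0) := by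
    funext r x; split <;> simp
  rw [h, PySem.List.foldl_add]

lemma sum_map_range_eq (n : Nat) (f : Nat → Int) :
    ((List.range n).map f).sum = ∑ i ∈ Finset.range n, f i := by
  induction n with
  | zero => simp
  | succ n ih => rw [List.range_succ, Finset.sum_range_succ, ← ih]; simp

lemma map_enumerate_eq (g : Int × Int → Int) :
    ∀ (l : List Int) (s : Int),
      (PySem.List.enumerate l s).map g
        = (List.range l.length).map (fun k => g (s + (k : Nat), l.getD k 0)) := by
  intro l
  induction l with
  | nil => intro s; simp [PySem.List.enumerate]
  | cons x l ih =>
    intro s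
    rw [PySem.List.enumerate_cons, List.map_cons, ih (s + 1)]
    rw [List.length_cons, List.range_succ_eq_map, List.map_cons, List.map_map]
    congr 1
    · norm_num
    · apply List.map_congr_left
      intro k _
      have hc : s + ((k + 1 : Nat) : Int) = s + 1 + (k : Nat) := by push_cast; ring
      simp only [Function.comp_def, List.getD_cons_succ, hc]

-- the count table over masks (all in [0, 1023]) that A's first loop builds
def pvCnt (l : List Int) (v : Nat) : Int := (l.count ((v : Nat) : Int) : Int)

lemma build_table : ∀ (ms : List Int) (tc : List Int), tc.length = 1024 →
    (∀ m ∈ ms, 0 ≤ m ∧ m ≤ 1023) →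
    ms.foldl (fun tc b => PySem.List.pySetD tc b (PySem.List.pyGetD tc b 0 + 1)) tc
      = (List.range 1024).map (fun v => tc.getD v 0 + pvCnt ms v) := by
  intro ms
  induction ms with
  | nil =>
    intro tc hlen _
    simp only [pvCnt, List.count_nil, List.foldl_nil, Int.natCast_zero, add_zero]
    apply List.ext_getElem (by simp [hlen])
    intro i h1 h2
    simp at h2
    simp [List.getD_eq_getElem?_getD, List.getElem?_eq_getElem h1]
  | cons m ms ih =>
    intro tc hlen hb
    obtain ⟨hm0, hm1⟩ := hb m (by simp)
    have hmn : m.toNat < 1024 := by omega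
    rw [List.foldl_cons, PySem.List.pySetD_of_nonneg _ _ hm0,
      ih _ (by simp [hlen]) (fun x hx => hb x (by simp [hx]))]
    apply List.map_congr_left
    intro v hv
    have hv4 : v < 1024 := List.mem_range.mp hv
    have hget : PySem.List.pyGetD tc m 0 = tc.getD m.toNat 0 := by
      rw [PySem.List.pyGetD_eq_getElem _ _ hm0 (by omega),
        List.getD_eq_getElem _ _ (by omega : m.toNat < tc.length)]
    rw [List.getD_eq_getElem _ _ (by simp [hlen]; omega : v < (tc.set m.toNat _).length),
      List.getElem_set]
    unfold pvCnt
    rw [List.count_cons]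
    by_cases hvm : m.toNat = v
    · have : m = (v : Int) := by omega
      simp [this]
      ring
    · have : ¬ (m = (v : Int)) := by omega
      simp [hvm, this, List.getD_eq_getElem?_getD, List.getElem?_eq_getElem (by omega : v < tc.length)]

-- the double sum both programs compute
def pvGsum (c : Nat → Int) : Int :=
  ∑ i ∈ Finset.range 1023, ∑ j ∈ Finset.range 1024,
    (if i < j ∧ (i ||| j) = 1023 then c i * c j else 0)

lemma inner_fold (tc : List Int) (p : Int × Int) (r : Int) :
    (PySem.List.pyRange (p.1 + 1) 1024 1).foldl
        (fun r i2 => if PySem.Int.bor p.1 i2 = 1023 then r + p.2 * PySem.List.pyGetD tc i2 0 else r) r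
      = r + ((PySem.List.pyRange (p.1 + 1) 1024 1).map
          (fun i2 => if PySem.Int.bor p.1 i2 = 1023 then p.2 * PySem.List.pyGetD tc i2 0 else 0)).sum :=
  foldl_if_add _ _ _ r

lemma outer_fold (tc : List Int) (l : List (Int × Int)) (r : Int) :
    l.foldl (fun r p => if p.2 ≠ 0 then
        (PySem.List.pyRange (p.1 + 1) 1024 1).foldl
          (fun r i2 => if PySem.Int.bor p.1 i2 = 1023 then r + p.2 * PySem.List.pyGetD tc i2 0 else r) r
      else r) r
    = r + (l.map (fun p => if p.2 ≠ 0 then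
        ((PySem.List.pyRange (p.1 + 1) 1024 1).map
          (fun i2 => if PySem.Int.bor p.1 i2 = 1023 then p.2 * PySem.List.pyGetD tc i2 0 else 0)).sum
      else 0)).sum := by
  have h : (fun (r : Int) (p : Int × Int) => if p.2 ≠ 0 then
        (PySem.List.pyRange (p.1 + 1) 1024 1).foldl
          (fun r i2 => if PySem.Int.bor p.1 i2 = 1023 then r + p.2 * PySem.List.pyGetD tc i2 0 else r) r
      else r)
      = fun (r : Int) (p : Int × Int) => r + (if p.2 ≠ 0 then
        ((PySem.List.pyRange (p.1 + 1) 1024 1).map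
          (fun i2 => if PySem.Int.bor p.1 i2 = 1023 then p.2 * PySem.List.pyGetD tc i2 0 else 0)).sum
      else 0) := by
    funext r p
    by_cases hp : p.2 ≠ 0
    · rw [if_pos hp, if_pos hp, inner_fold]
    · rw [if_neg hp, if_neg hp, add_zero]
  rw [h, PySem.List.foldl_add]

-- the inner loop of A, evaluated against the finished count table
lemma summand_eq (c : Nat → Int) (k : Nat) (hk : k < 1023) :
    (if c k ≠ 0 then
        ((PySem.List.pyRange ((k : Int) + 1) 1024 1).map
          (fun i2 => if PySem.Int.bor (k : Int) i2 = 1023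
            then c k * PySem.List.pyGetD ((List.range 1024).map c) i2 0 else 0)).sum
      else 0)
      = ∑ j ∈ Finset.range 1024, (if k < j ∧ (k ||| j) = 1023 then c k * c j else 0) := by
  have hmain :
      ((PySem.List.pyRange ((k : Int) + 1) 1024 1).map
          (fun i2 => if PySem.Int.bor (k : Int) i2 = 1023
            then c k * PySem.List.pyGetD ((List.range 1024).map c) i2 0 else 0)).sum
        = ∑ j ∈ Finset.range 1024, (if k < j ∧ (k ||| j) = 1023 then c k * c j else 0) := by
    rw [PySem.List.pyRange_one, List.map_map]
    have hlen : ((1024 : Int) - ((k : Int) + 1)).toNat = 1023 - k := by omega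
    rw [hlen, sum_map_range_eq]
    have hpt : ∀ j ∈ Finset.range (1023 - k),
        ((fun i2 => if PySem.Int.bor (k : Int) i2 = 1023
            then c k * PySem.List.pyGetD ((List.range 1024).map c) i2 0 else 0) ∘
          (fun j : Nat => (k : Int) + 1 + (j : Int))) j
          = (if (k ||| (k + 1 + j)) = 1023 then c k * c (k + 1 + j) else 0) := by
      intro j hj
      have hj' : j < 1023 - k := Finset.mem_range.mp hj
      have hcast : (k : Int) + 1 + (j : Int) = ((k + 1 + j : Nat) : Int) := by push_cast; ring
      simp only [Function.comp_apply, hcast]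
      have hbor : (PySem.Int.bor (k : Int) ((k + 1 + j : Nat) : Int) = 1023)
          ↔ ((k ||| (k + 1 + j)) = 1023) := by
        rw [PySem.Int.bor_natCast]; omega
      have hget : PySem.List.pyGetD ((List.range 1024).map c) ((k + 1 + j : Nat) : Int) 0
          = c (k + 1 + j) := by
        rw [PySem.List.pyGetD_natCast, PySem.List.getD_map_range _ _ _ _ (by omega)]
      exact if_congr hbor (by rw [hget]) rfl
    rw [Finset.sum_congr rfl hpt]
    -- reindex the right-hand side over [k+1, 1024)
    have hsplit : (∑ j ∈ Finset.range 1024, (if k < j ∧ (k ||| j) = 1023 then c k * c j else 0))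
        = ∑ j ∈ Finset.Ico (k + 1) 1024, (if k < j ∧ (k ||| j) = 1023 then c k * c j else 0) := by
      rw [Finset.range_eq_Ico,
        ← Finset.sum_Ico_consecutive _ (by omega : 0 ≤ k + 1) (by omega : k + 1 ≤ 1024)]
      have hz : (∑ j ∈ Finset.Ico 0 (k + 1), (if k < j ∧ (k ||| j) = 1023 then c k * c j else 0)) = 0 := by
        apply Finset.sum_eq_zero
        intro j hj
        have := Finset.mem_Ico.mp hj
        rw [if_neg (by omega)]
      rw [hz, zero_add]
    rw [hsplit, Finset.sum_Ico_eq_sum_range]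
    have hlen2 : 1024 - (k + 1) = 1023 - k := by omega
    rw [hlen2]
    apply Finset.sum_congr rfl
    intro j _
    exact if_congr (by omega) rfl rfl
  by_cases hck : c k = 0
  · rw [if_neg (by simpa using hck)]
    symm
    apply Finset.sum_eq_zero
    intro j _
    split_ifs
    · rw [hck, zero_mul]
    · rfl
  · rw [if_pos hck, hmain]

-- ---- B's pairwise loop counts the same thing ----

lemma pairLoop_acc : ∀ (l : List Int) (r : Int), pvPairLoop l r = r + pvPairLoop l 0 := by
  intro l
  induction l with
  | nil => intro r; simp [pvPairLoop]
  | cons m l ih =>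
    intro r
    simp only [pvPairLoop]
    rw [foldl_if_add, foldl_if_add, ih, ih ((0 : Int) + _)]
    ring

lemma cnt_cons (m : Int) (l : List Int) (hm : 0 ≤ m) (v : Nat) :
    pvCnt (m :: l) v = pvCnt l v + (if v = m.toNat then 1 else 0) := by
  unfold pvCnt
  rw [List.count_cons]
  by_cases h : v = m.toNat
  · have : (m == (v : Int)) = true := by simp; omega
    simp [h, this, hm]
  · have : (m == (v : Int)) = false := by simp; omega
    simp [h, this]

lemma fd_succ (x : Int) :
    PySem.Int.floordiv ((x + 1) * (x + 1 - 1)) 2 = PySem.Int.floordiv (x * (x - 1)) 2 + x := by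
  obtain ⟨k, hk⟩ := Int.even_mul_succ_self (x - 1)
  have he : (x - 1) * (x - 1 + 1) = x * (x - 1) := by ring
  have h1 : x * (x - 1) = 2 * k := by linarith
  have h2 : (x + 1) * (x + 1 - 1) = 2 * (k + x) := by nlinarith
  rw [h1, h2, PySem.Int.floordiv_eq_ediv_of_pos (by norm_num),
    PySem.Int.floordiv_eq_ediv_of_pos (by norm_num),
    Int.mul_ediv_cancel_left _ (by norm_num), Int.mul_ediv_cancel_left _ (by norm_num)]

-- the matches of a new mask m against the already-seen masks, as a sum over the count table
lemma matches_eq (m : Int) (hm0 : 0 ≤ m) (hm1 : m ≤ 1023) :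
    ∀ (l : List Int), (∀ x ∈ l, 0 ≤ x ∧ x ≤ 1023) →
      ((l.map (fun x => if PySem.Int.bor m x = 1023 then (1 : Int) else 0)).sum)
        = ∑ v ∈ Finset.range 1024, (if (m.toNat ||| v) = 1023 then pvCnt l v else 0) := by
  intro l
  induction l with
  | nil => simp [pvCnt]
  | cons x l ih =>
    intro hb
    obtain ⟨hx0, hx1⟩ := hb x (by simp)
    have hxn : x.toNat < 1024 := by omega
    rw [List.map_cons, List.sum_cons, ih (fun y hy => hb y (by simp [hy]))]
    have hcnt : ∀ v ∈ Finset.range 1024,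
        (if (m.toNat ||| v) = 1023 then pvCnt (x :: l) v else 0)
          = (if (m.toNat ||| v) = 1023 then pvCnt l v else 0)
            + (if v = x.toNat then (if (m.toNat ||| v) = 1023 then 1 else 0) else 0) := by
      intro v _
      rw [cnt_cons x l hx0 v]
      split_ifs <;> ring
    rw [Finset.sum_congr rfl hcnt, Finset.sum_add_distrib, Finset.sum_ite_eq' (Finset.range 1024)]
    have hmem : x.toNat ∈ Finset.range 1024 := Finset.mem_range.mpr hxn
    rw [if_pos hmem]
    have h1 : PySem.Int.bor m x = ((m.toNat ||| x.toNat : Nat) : Int) := by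
      conv_lhs => rw [← Int.toNat_of_nonneg hm0, ← Int.toNat_of_nonneg hx0]
      rw [PySem.Int.bor_natCast]
    have hbor : (PySem.Int.bor m x = 1023) ↔ ((m.toNat ||| x.toNat) = 1023) := by
      rw [h1]; omega
    simp only [hbor]
    ring

-- adding one occurrence of mask M to the count table changes the double sum by the
-- matches of M below it (as first index) plus the matches of M above it (as second index)
lemma gsum_delta (c : Nat → Int) (M : Nat) (hM : M ≤ 1023) :
    pvGsum (fun v => c v + (if v = M then 1 else 0))
      = pvGsum c
        + (∑ i ∈ Finset.range 1023, (if i < M ∧ (i ||| M) = 1023 then c i else 0))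
        + (∑ j ∈ Finset.range 1024, (if M < j ∧ (M ||| j) = 1023 then c j else 0)) := by
  unfold pvGsum
  have hterm : ∀ i ∈ Finset.range 1023, ∀ j ∈ Finset.range 1024,
      (if i < j ∧ (i ||| j) = 1023 then (c i + (if i = M then 1 else 0)) * (c j + (if j = M then 1 else 0)) else 0)
        = (if i < j ∧ (i ||| j) = 1023 then c i * c j else 0)
          + (if j = M then (if i < M ∧ (i ||| M) = 1023 then c i else 0) else 0)
          + (if i = M then (if M < j ∧ (M ||| j) = 1023 then c j else 0) else 0) := by
    intro i _ j _
    by_cases hj : j = M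
    · by_cases hi : i = M
      · simp only [hj, hi]
        split_ifs <;> first | ring1 | (exfalso; omega)
      · simp only [hj, if_neg hi]
        split_ifs <;> first | ring1 | (exfalso; omega)
    · by_cases hi : i = M
      · simp only [hi, if_neg hj]
        split_ifs <;> first | ring1 | (exfalso; omega)
      · simp only [if_neg hi, if_neg hj]
        split_ifs <;> first | ring1 | (exfalso; omega)
  calc ∑ i ∈ Finset.range 1023, ∑ j ∈ Finset.range 1024,
        (if i < j ∧ (i ||| j) = 1023 then (c i + (if i = M then 1 else 0)) * (c j + (if j = M then 1 else 0)) else 0)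
      = ∑ i ∈ Finset.range 1023, (∑ j ∈ Finset.range 1024,
          ((if i < j ∧ (i ||| j) = 1023 then c i * c j else 0)
            + (if j = M then (if i < M ∧ (i ||| M) = 1023 then c i else 0) else 0)
            + (if i = M then (if M < j ∧ (M ||| j) = 1023 then c j else 0) else 0))) := by
        apply Finset.sum_congr rfl
        intro i hi
        exact Finset.sum_congr rfl (hterm i hi)
    _ = pvGsum c
        + (∑ i ∈ Finset.range 1023, (if i < M ∧ (i ||| M) = 1023 then c i else 0))
        + (∑ j ∈ Finset.range 1024, (if M < j ∧ (M ||| j) = 1023 then c j else 0)) := by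
        simp only [Finset.sum_add_distrib]
        unfold pvGsum
        congr 1
        congr 1
        · apply Finset.sum_congr rfl
          intro i _
          rw [Finset.sum_ite_eq' (Finset.range 1024), if_pos (Finset.mem_range.mpr (by omega))]
        · rw [Finset.sum_comm]
          apply Finset.sum_congr rfl
          intro j hjm
          rw [Finset.sum_ite_eq' (Finset.range 1023)]
          by_cases hM3 : M < 1023
          · rw [if_pos (Finset.mem_range.mpr hM3)]
          · have h0 : ¬ (M < j ∧ (M ||| j) = 1023) := by
              rintro ⟨hlt, -⟩
              have := Finset.mem_range.mp hjm
              omega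
            rw [if_neg (by simp [Finset.mem_range]; omega), if_neg h0]

-- the three partial sums recombine into the full per-mask match sum
lemma gsum_combine (c : Nat → Int) (M : Nat) (hM : M ≤ 1023) :
    (∑ i ∈ Finset.range 1023, (if i < M ∧ (i ||| M) = 1023 then c i else 0))
      + (∑ j ∈ Finset.range 1024, (if M < j ∧ (M ||| j) = 1023 then c j else 0))
      + (if M = 1023 then c 1023 else 0)
      = ∑ v ∈ Finset.range 1024, (if (M ||| v) = 1023 then c v else 0) := by
  have hsplit : ∀ v ∈ Finset.range 1024,
      (if (M ||| v) = 1023 then c v else 0)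
        = (if v < M ∧ (v ||| M) = 1023 then c v else 0)
          + (if v = M then (if M = 1023 then c 1023 else 0) else 0)
          + (if M < v ∧ (M ||| v) = 1023 then c v else 0) := by
    intro v _
    by_cases hvm : v = M
    · subst hvm
      simp only [Nat.or_self]
      split_ifs <;> first | ring1 | (exfalso; omega) | (subst_vars; ring1)
    · rcases Nat.lt_or_ge v M with h | h
      · rw [Nat.lor_comm]
        split_ifs <;> first | ring1 | (exfalso; omega)
      · have : M < v := by omega
        split_ifs <;> first | ring1 | (exfalso; omega)
  rw [Finset.sum_congr rfl hsplit, Finset.sum_add_distrib, Finset.sum_add_distrib,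
    Finset.sum_ite_eq' (Finset.range 1024), if_pos (Finset.mem_range.mpr (by omega : M < 1024))]
  have hA : (∑ v ∈ Finset.range 1024, (if v < M ∧ (v ||| M) = 1023 then c v else 0))
      = ∑ i ∈ Finset.range 1023, (if i < M ∧ (i ||| M) = 1023 then c i else 0) := by
    rw [show (1024 : Nat) = 1023 + 1 from rfl, Finset.sum_range_succ,
      if_neg (by omega : ¬ ((1023 : Nat) < M ∧ ((1023 : Nat) ||| M) = 1023)), add_zero]
  rw [hA]
  ring

lemma B_eq_sum : ∀ (l : List Int), (∀ m ∈ l, 0 ≤ m ∧ m ≤ 1023) →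
    pvPairLoop l 0
      = pvGsum (pvCnt l) + PySem.Int.floordiv (pvCnt l 1023 * (pvCnt l 1023 - 1)) 2 := by
  intro l
  induction l with
  | nil =>
    intro _
    have h1 : pvGsum (pvCnt []) = 0 := by
      apply Finset.sum_eq_zero
      intro i _
      apply Finset.sum_eq_zero
      intro j _
      simp [pvCnt]
    rw [h1]
    simp [pvPairLoop, pvCnt]
  | cons m l ih =>
    intro hb
    obtain ⟨hm0, hm1⟩ := hb m (by simp)
    have hbl : ∀ x ∈ l, 0 ≤ x ∧ x ≤ 1023 := fun x hx => hb x (by simp [hx])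
    have hMn : m.toNat ≤ 1023 := by omega
    simp only [pvPairLoop]
    rw [foldl_if_add, pairLoop_acc, ih hbl, zero_add,
      matches_eq m hm0 hm1 l hbl]
    have hc' : pvCnt (m :: l) = fun v => pvCnt l v + (if v = m.toNat then 1 else 0) :=
      funext (cnt_cons m l hm0)
    rw [hc', gsum_delta (pvCnt l) m.toNat hMn, ← gsum_combine (pvCnt l) m.toNat hMn]
    by_cases hM : m.toNat = 1023
    · rw [hM]
      simp only [eq_self_iff_true, if_true]
      rw [fd_succ (pvCnt l 1023)]
      ring
    · have h1 : (if m.toNat = 1023 then pvCnt l 1023 else 0) = 0 := if_neg hM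
      have h2 : (if (1023 : Nat) = m.toNat then (1 : Int) else 0) = 0 :=
        if_neg (fun h => hM h.symm)
      simp only [h1, h2, add_zero]
      ring1

lemma outer_sum_eq (c : Nat → Int) :
    ((PySem.List.enumerate ((List.range 1023).map c) 0).map (fun p =>
        if p.2 ≠ 0 then
          ((PySem.List.pyRange (p.1 + 1) 1024 1).map
            (fun i2 => if PySem.Int.bor p.1 i2 = 1023
              then p.2 * PySem.List.pyGetD ((List.range 1024).map c) i2 0 else 0)).sum
        else 0)).sum = pvGsum c := by
  rw [map_enumerate_eq]
  simp only [List.length_map, List.length_range, zero_add]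
  rw [sum_map_range_eq]
  unfold pvGsum
  apply Finset.sum_congr rfl
  intro k hk
  have hk3 := Finset.mem_range.mp hk
  rw [PySem.List.getD_map_range _ _ _ _ hk3]
  exact summand_eq c k hk3

lemma A_eq_sum (tickets : List String) :
    winningLotteryTicket tickets
      = pvGsum (pvCnt (tickets.map pvMask))
        + PySem.Int.floordiv
            (pvCnt (tickets.map pvMask) 1023 * (pvCnt (tickets.map pvMask) 1023 - 1)) 2 := by
  have hbnd : ∀ m ∈ tickets.map pvMask, 0 ≤ m ∧ m ≤ 1023 := by
    intro m hm
    obtain ⟨t, _, ht⟩ := List.mem_map.mp hm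
    rw [← ht]; exact mask_bounds t
  simp only [winningLotteryTicket]
  simp only [maskA_eq]
  rw [show (fun (t_count : List Int) (t : String) =>
        PySem.List.pySetD t_count (pvMask t) (PySem.List.pyGetD t_count (pvMask t) 0 + 1))
      = (fun (t_count : List Int) (t : String) =>
        (fun (tc : List Int) (b : Int) => PySem.List.pySetD tc b (PySem.List.pyGetD tc b 0 + 1))
          t_count (pvMask t)) from rfl,
    ← List.foldl_map (f := pvMask)
      (g := fun (tc : List Int) (b : Int) => PySem.List.pySetD tc b (PySem.List.pyGetD tc b 0 + 1))
      (l := tickets) (init := List.replicate 1024 0),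
    build_table (tickets.map pvMask) _ (by simp) hbnd]
  have hrepl : (List.range 1024).map
        (fun v => (List.replicate 1024 (0 : Int)).getD v 0 + pvCnt (tickets.map pvMask) v)
      = (List.range 1024).map (pvCnt (tickets.map pvMask)) := by
    apply List.map_congr_left
    intro v hv
    have hv4 := List.mem_range.mp hv
    rw [List.getD_eq_getElem _ _ (by simp; omega), List.getElem_replicate, zero_add]
  rw [hrepl]
  set c := pvCnt (tickets.map pvMask) with hc
  -- the slice is the first 1023 table entries
  have hslice : PySem.List.slice ((List.range 1024).map c) none (some 1023)
      = (List.range 1023).map c := by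
    rw [PySem.List.slice_to _ (by norm_num), show ((1023 : Int)).toNat = 1023 from rfl,
      ← List.map_take, List.take_range, show min 1023 1024 = 1023 from rfl]
  rw [hslice, outer_fold, zero_add]
  -- the last entry of the table is c 1023
  have hlast : PySem.List.pyGetD ((List.range 1024).map c) (-1) (0 : Int) = c 1023 := by
    rw [PySem.List.pyGetD_neg_one _ _ (by simp), List.getLast_eq_getElem]
    simp
  rw [hlast, outer_sum_eq c]

-- ===== VERDICT (by name: the statement is the Claim_ definition above) =====
theorem winningLotteryTicket_spec : Claim_equal_winningLotteryTicket := by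
  intro tickets _
  unfold Spec_winningLotteryTicket winningLotteryTicket_alt
  rw [A_eq_sum, B_eq_sum (tickets.map pvMask)
    (by intro m hm; obtain ⟨t, _, ht⟩ := List.mem_map.mp hm; rw [← ht]; exact mask_bounds t)]
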